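-- pv_equiv track=rewrite | github.com/Albert-learner/Algorithm | Programmers/LEVEL3/StarSequence.py | solution_other
-- ===== SOURCE A (Python) =====
-- from collections import Counter
--
-- def solution_other(a):
--     answer = -1
--
--     if len(a) % 2 != 0 or len(a) < 2:
--         answer = 0
--
--     counter = Counter(a)
--     for key, val in counter.items():
--         if counter[key] * 2 < answer:
--             continue
--
--         max_val, idx = key, 0
--         length = 0
--         while idx < len(a) - 1:
--             if (a[idx] != max_val and a[idx + 1] != max_val) or a[idx] == a[idx + 1]:
--                 idx += 1
--                 continue
--
--             length += 2
--             idx += 2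
--
--         answer = max(answer, length)
--
--     return answer
-- ===== SOURCE B (Python) =====
-- from collections import Counter
-- from itertools import groupby
--
-- def solution_other(a):
--     # Key insight: for a fixed star, whether two elements can pair depends only
--     # on the boolean pattern (x == star): a pair forms iff exactly one of the
--     # two is the star.  So run-length encode that boolean string and count
--     # pairs per run boundary with a 0/1 carry.
--     best = 0 if (len(a) % 2 != 0 or len(a) < 2) else -1
--     for star, cnt in Counter(a).items():
--         if 2 * cnt <= best:   # a star occurring cnt times yields at most 2*cnt
--             continue
--         pairs, carry = 0, 0
--         for _, grp in groupby(x == star for x in a):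
--             run = sum(1 for _ in grp)
--             pairs += carry
--             carry = 0 if (carry and run == 1) else 1
--         best = max(best, 2 * pairs)
--     return best
-- ===== Notes on version B (the rewrite author's own statement) =====
-- stated objective: faster
-- what changed: B replaces A's index-jumping greedy walk over adjacent element values by a reduction to the boolean pattern (x == star): a pair forms iff exactly one of the two elements equals the star, so B run-length encodes that boolean string (itertools.groupby) and counts pairs per run with a 0/1 carry, never comparing element values to each other; it also prunes a star whose occurrence count cannot beat the current best with <= instead of A's <, which (provably without changing the result) skips tying stars that A re-scans, e.g. on duplicate-free inputs where A does a full pass per distinct value.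
import Mathlib
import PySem

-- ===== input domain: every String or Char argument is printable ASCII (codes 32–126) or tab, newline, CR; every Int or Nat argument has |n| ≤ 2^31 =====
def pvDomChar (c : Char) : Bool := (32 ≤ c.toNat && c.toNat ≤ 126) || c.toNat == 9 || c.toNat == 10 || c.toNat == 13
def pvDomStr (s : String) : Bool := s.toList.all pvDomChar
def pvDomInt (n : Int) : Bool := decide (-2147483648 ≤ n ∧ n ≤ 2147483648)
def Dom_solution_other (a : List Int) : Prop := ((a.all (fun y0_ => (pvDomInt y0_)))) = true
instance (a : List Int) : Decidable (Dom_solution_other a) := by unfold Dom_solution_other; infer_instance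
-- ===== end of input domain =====

-- B reduces each star's greedy pairing to the boolean pattern (x == star): it run-length
-- encodes that pattern and counts pairs per run with a 0/1 carry (no element-value comparisons),
-- and prunes stars that cannot beat the current best with <= instead of A's <; equal results proved below.

-- ===== PORT A =====
-- inner while loop of A; indices are proven in range by the guard, so getD's default is never used
def pvWhileA (a : List Int) (maxVal : Int) (idx : Nat) (length : Int) : Int :=
  if _h : idx + 1 < a.length then
    if (a.getD idx 0 ≠ maxVal ∧ a.getD (idx + 1) 0 ≠ maxVal) ∨ a.getD idx 0 = a.getD (idx + 1) 0
    then pvWhileA a maxVal (idx + 1) length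
    else pvWhileA a maxVal (idx + 2) (length + 2)
  else length
termination_by a.length - idx

def solution_other (a : List Int) : Int :=
  let answer : Int := if a.length % 2 ≠ 0 ∨ a.length < 2 then 0 else -1
  let counter := PySem.Dict.counter a
  counter.items.foldl
    (fun answer p =>
      if counter.getD p.1 0 * 2 < answer then answer
      else max answer (pvWhileA a p.1 0 0))
    answer

-- ===== PORT B =====
-- itertools.groupby ported as a run-length encoding (runs in order, positive Int lengths)
def pvRuns : List Bool → List (Bool × Int)
  | [] => []
  | x :: t =>
    match pvRuns t with
    | (b, n) :: r => if x = b then (b, n + 1) :: r else (x, 1) :: (b, n) :: r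
    | [] => [(x, 1)]

-- one run of the inner loop of Source B: state = (pairs, carry)
def pvRunStep (p : Int × Int) (r : Bool × Int) : Int × Int :=
  (p.1 + p.2, if p.2 ≠ 0 ∧ r.2 = 1 then 0 else 1)

def solution_other_alt (a : List Int) : Int :=
  let base : Int := if a.length % 2 ≠ 0 ∨ a.length < 2 then 0 else -1
  (PySem.Dict.counter a).items.foldl
    (fun best p =>
      if 2 * p.2 ≤ best then best
      else
        let s := (pvRuns (a.map (fun x => decide (x = p.1)))).foldl pvRunStep (0, 0)
        max best (2 * s.1))
    base

-- ===== PRECONDITION & SPEC =====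
def Spec_solution_other (a : List Int) (out : Int) : Prop := out = solution_other_alt a
instance (a : List Int) (out : Int) : Decidable (Spec_solution_other a out) := by unfold Spec_solution_other; infer_instance

-- ===== CLAIM (what is proved, stated in full; the proofs are below) =====
def Claim_equal_solution_other : Prop := ∀ (a : List Int), Dom_solution_other a → Spec_solution_other a (solution_other a)

-- ===== LEMMAS AND PROOFS =====

-- the greedy value both programs compute for one star
def gG (k : Int) : List Int → Int
  | [] => 0
  | [_] => 0
  | x :: y :: t => if (x ≠ k ∧ y ≠ k) ∨ x = y then gG k (y :: t) else 2 + gG k t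

theorem gG_short (k : Int) (l : List Int) (h : l.length ≤ 1) : gG k l = 0 := by
  match l, h with
  | [], _ => rfl
  | [_], _ => rfl

theorem pvWhileA_eq_gG (a : List Int) (k : Int) (idx : Nat) (len : Int) :
    pvWhileA a k idx len = len + gG k (a.drop idx) := by
  induction idx, len using pvWhileA.induct a k with
  | case1 idx len h hc ih =>
    have h0 : idx < a.length := by omega
    rw [pvWhileA]
    rw [List.drop_eq_getElem_cons h0, List.drop_eq_getElem_cons h]
    simp only [dif_pos h, if_pos hc] at *
    rw [ih]
    have e0 : a.getD idx 0 = a[idx] := List.getD_eq_getElem a 0 h0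
    have e1 : a.getD (idx + 1) 0 = a[idx + 1] := List.getD_eq_getElem a 0 h
    rw [gG, if_pos (by rw [← e0, ← e1]; exact hc)]
    rw [List.drop_eq_getElem_cons h]
  | case2 idx len h hc ih =>
    have h0 : idx < a.length := by omega
    rw [pvWhileA]
    simp only [dif_pos h, if_neg hc] at *
    rw [ih]
    rw [List.drop_eq_getElem_cons h0, List.drop_eq_getElem_cons h]
    have e0 : a.getD idx 0 = a[idx] := List.getD_eq_getElem a 0 h0
    have e1 : a.getD (idx + 1) 0 = a[idx + 1] := List.getD_eq_getElem a 0 h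
    rw [gG, if_neg (by rw [← e0, ← e1]; exact hc)]
    rw [show idx + 1 + 1 = idx + 2 from by omega]
    omega
  | case3 idx len h =>
    rw [pvWhileA, dif_neg h, gG_short k _ (by simp; omega)]
    omega

theorem gG_le_count (k : Int) (l : List Int) : gG k l ≤ 2 * (l.count k : Int) := by
  induction l using gG.induct k with
  | case1 => simp [gG]
  | case2 x => simp [gG]
  | case3 x y t hc ih =>
    rw [gG, if_pos hc]
    have : (y :: t).count k ≤ ((x :: y :: t).count k) := by
      simp [List.count_cons]
    have := ih
    push_cast at *
    omega
  | case4 x y t hc ih =>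
    rw [gG, if_neg hc]
    have hk : x = k ∨ y = k := by tauto
    have hcnt : t.count k + 1 ≤ (x :: y :: t).count k := by
      rcases hk with h | h <;> simp [h, List.count_cons]
    push_cast at *
    omega

theorem fold_prune_eq (a : List Int) (ks : List Int) (ans0 : Int) :
    ks.foldl
      (fun ans k =>
        if (a.count k : Int) * 2 < ans then ans else max ans (gG k a)) ans0
    = ks.foldl (fun ans k => max ans (gG k a)) ans0 := by
  induction ks generalizing ans0 with
  | nil => rfl
  | cons k ks ih =>
    rw [List.foldl_cons, List.foldl_cons, ih]
    congr 1
    by_cases h : (a.count k : Int) * 2 < ans0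
    · rw [if_pos h]
      have := gG_le_count k a
      omega
    · rw [if_neg h]

theorem fold_prune_eq_le (a : List Int) (ks : List Int) (ans0 : Int) :
    ks.foldl
      (fun ans k =>
        if 2 * (a.count k : Int) ≤ ans then ans else max ans (gG k a)) ans0
    = ks.foldl (fun ans k => max ans (gG k a)) ans0 := by
  induction ks generalizing ans0 with
  | nil => rfl
  | cons k ks ih =>
    rw [List.foldl_cons, List.foldl_cons, ih]
    congr 1
    by_cases h : 2 * (a.count k : Int) ≤ ans0
    · rw [if_pos h]
      have := gG_le_count k a
      omega
    · rw [if_neg h]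

-- held-element pass on the boolean pattern: bridge between gG and the run fold
def hB : Option Bool → List Bool → Int
  | _, [] => 0
  | none, x :: t => hB (some x) t
  | some b, x :: t => if b = x then hB (some x) t else 2 + hB none t

theorem gG_eq_hB (k : Int) (l : List Int) :
    gG k l = hB none (l.map (fun x => decide (x = k))) := by
  induction l using gG.induct k with
  | case1 => rfl
  | case2 x => rfl
  | case3 x y t hc ih =>
    rw [gG, if_pos hc]
    have hb : decide (x = k) = decide (y = k) := by
      rcases hc with ⟨h1, h2⟩ | h
      · simp [h1, h2]
      · subst h; rfl
    simp only [List.map_cons, hB, hb] at *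
    exact ih
  | case4 x y t hc ih =>
    rw [gG, if_neg hc]
    have hb : decide (x = k) ≠ decide (y = k) := by
      obtain ⟨h1, h2⟩ := not_or.mp hc
      by_cases hx : x = k
      · have hy : y ≠ k := fun h => h2 (hx.trans h.symm)
        simp [hx, hy]
      · have hy : y = k := by tauto
        simp [hx, hy]
    simp only [List.map_cons, hB, if_neg hb] at *
    omega

def flatR : List (Bool × Int) → List Bool
  | [] => []
  | (b, n) :: r => List.replicate n.toNat b ++ flatR r

-- well-formedness of a run list relative to the held element
def AltW : Option Bool → List (Bool × Int) → Prop
  | _, [] => True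
  | none, (b, n) :: r => 1 ≤ n ∧ AltW (some b) r
  | some c, (b, n) :: r => 1 ≤ n ∧ c ≠ b ∧ AltW (some b) r

theorem altW_weaken (R : List (Bool × Int)) (b : Bool) (h : AltW (some b) R) : AltW none R := by
  cases R with
  | nil => trivial
  | cons p r =>
    obtain ⟨bb, n⟩ := p
    exact ⟨h.1, h.2.2⟩

theorem pvRuns_spec (l : List Bool) : flatR (pvRuns l) = l ∧ AltW none (pvRuns l) := by
  induction l with
  | nil => exact ⟨rfl, trivial⟩
  | cons x t ih =>
    obtain ⟨ihf, ihw⟩ := ih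
    cases hR : pvRuns t with
    | nil =>
      have ht : t = [] := by rw [← ihf, hR]; rfl
      subst ht
      have hrw : pvRuns [x] = [(x, 1)] := rfl
      refine ⟨?_, ?_⟩
      · rw [hrw]; rfl
      · rw [hrw]; exact ⟨by norm_num, trivial⟩
    | cons q r =>
      obtain ⟨b, n⟩ := q
      rw [hR] at ihf ihw
      have hn : 1 ≤ n := ihw.1
      have hw2 : AltW (some b) r := ihw.2
      by_cases hx : x = b
      · subst hx
        have hrw : pvRuns (x :: t) = (x, n + 1) :: r := by
          simp only [pvRuns, hR, if_true]
        refine ⟨?_, ?_⟩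
        · rw [hrw]
          show List.replicate (n + 1).toNat x ++ flatR r = x :: t
          have hnn : (n + 1).toNat = n.toNat + 1 := by omega
          rw [hnn, List.replicate_succ, List.cons_append]
          rw [← ihf]; rfl
        · rw [hrw]; exact ⟨by omega, hw2⟩
      · have hrw : pvRuns (x :: t) = (x, 1) :: (b, n) :: r := by
          simp only [pvRuns, hR, if_neg hx]
        refine ⟨?_, ?_⟩
        · rw [hrw]
          show List.replicate (1 : Int).toNat x ++ flatR ((b, n) :: r) = x :: t
          rw [← ihf]; rfl
        · rw [hrw]; exact ⟨by norm_num, hn, hx, hw2⟩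

def cOf : Option Bool → Int
  | none => 0
  | some _ => 1

theorem hB_absorb (b : Bool) (m : Nat) (rest : List Bool) :
    hB (some b) (List.replicate m b ++ rest) = hB (some b) rest := by
  induction m with
  | zero => rfl
  | succ m ih => simpa [List.replicate_succ, hB] using ih

theorem hB_none_run (b : Bool) (m : Nat) (rest : List Bool) (hm : 1 ≤ m) :
    hB none (List.replicate m b ++ rest) = hB (some b) rest := by
  obtain ⟨m', rfl⟩ : ∃ m', m = m' + 1 := ⟨m - 1, by omega⟩
  simp [List.replicate_succ, hB, hB_absorb]

theorem hB_some_run (c b : Bool) (hcb : c ≠ b) (m : Nat) (rest : List Bool) (hm : 1 ≤ m) :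
    hB (some c) (List.replicate m b ++ rest)
      = 2 + (if m = 1 then hB none rest else hB (some b) rest) := by
  obtain ⟨m', rfl⟩ : ∃ m', m = m' + 1 := ⟨m - 1, by omega⟩
  rw [List.replicate_succ, List.cons_append, hB, if_neg hcb]
  rcases Nat.eq_zero_or_pos m' with h0 | h0
  · subst h0; simp
  · rw [hB_none_run b m' rest h0, if_neg (by omega)]

theorem runFold_eq_hB (R : List (Bool × Int)) (p : Int) (h : Option Bool)
    (hw : AltW h R) :
    2 * ((R.foldl pvRunStep (p, cOf h)).1) = 2 * p + hB h (flatR R) := by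
  induction R generalizing p h with
  | nil => cases h <;> simp [flatR, hB]
  | cons r R ih =>
    obtain ⟨b, n⟩ := r
    have hfr : flatR ((b, n) :: R) = List.replicate n.toNat b ++ flatR R := rfl
    cases h with
    | none =>
      obtain ⟨hn, hw2⟩ := hw
      have hstate : pvRunStep (p, cOf none) (b, n) = (p, cOf (some b)) := by
        simp [pvRunStep, cOf]
      rw [List.foldl_cons, hstate, ih p (some b) hw2]
      rw [hfr, hB_none_run b n.toNat _ (by omega)]
    | some c =>
      obtain ⟨hn, hcb, hw2⟩ := hw
      by_cases h1 : n = 1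
      · have hstate : pvRunStep (p, cOf (some c)) (b, n) = (p + 1, cOf none) := by
          simp [pvRunStep, cOf, h1]
        rw [List.foldl_cons, hstate, ih (p + 1) none (altW_weaken R b hw2)]
        rw [hfr, hB_some_run c b hcb n.toNat _ (by omega), if_pos (by omega)]
        omega
      · have hstate : pvRunStep (p, cOf (some c)) (b, n) = (p + 1, cOf (some b)) := by
          simp [pvRunStep, cOf, h1]
        rw [List.foldl_cons, hstate, ih (p + 1) (some b) hw2]
        rw [hfr, hB_some_run c b hcb n.toNat _ (by omega), if_neg (by omega)]
        omega

-- ===== VERDICT (by name: the statement is the Claim_ definition above) =====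
theorem solution_other_spec : Claim_equal_solution_other := by
  intro a _
  unfold Spec_solution_other solution_other solution_other_alt
  simp only [PySem.Dict.items_counter, PySem.Dict.getD_counter, List.foldl_map]
  have hA : ∀ k : Int, pvWhileA a k 0 0 = gG k a := by
    intro k
    rw [pvWhileA_eq_gG]
    simp
  have hstep :
      (fun (ans : Int) (k : Int) =>
        if (a.count k : Int) * 2 < ans then ans else max ans (pvWhileA a k 0 0))
      = fun ans k => if (a.count k : Int) * 2 < ans then ans else max ans (gG k a) := by
    funext ans k; rw [hA]
  rw [hstep, fold_prune_eq]
  have hB' : ∀ k : Int,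
      2 * (((pvRuns (a.map (fun x => decide (x = k)))).foldl pvRunStep (0, 0)).1) = gG k a := by
    intro k
    obtain ⟨hf, hw⟩ := pvRuns_spec (a.map (fun x => decide (x = k)))
    have := runFold_eq_hB (pvRuns (a.map (fun x => decide (x = k)))) 0 none hw
    simp only [cOf] at this
    rw [hf] at this
    rw [gG_eq_hB]
    omega
  have hstep2 :
      (fun (best : Int) (star : Int) =>
        if 2 * (a.count star : Int) ≤ best then best
        else max best (2 * ((pvRuns (a.map (fun x => decide (x = star)))).foldl pvRunStep (0, 0)).1))
      = fun best star =>
        if 2 * (a.count star : Int) ≤ best then best else max best (gG star a) := by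
    funext best star; rw [hB' star]
  rw [hstep2, fold_prune_eq_le]
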